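-- pv_equiv track=rewrite | github.com/pdebus/IBMQuantumChallenge2020 | src/utils/board_tools.py | kbits
-- ===== SOURCE A (Python) =====
-- def kbits(n, k):
--     import itertools
--
--     result = []
--     for bits in itertools.combinations(range(n), k):
--         s = [0] * n
--         for bit in bits:
--             s[bit] = 1
--         result.append(s)
--
--     return result
-- ===== SOURCE B (Python) =====
-- def kbits(n, k):
--     result = []
--     stack = [(0, k, [])]          # frames: (position, ones still needed, prefix built so far)
--     while stack:
--         pos, ones, prefix = stack.pop()
--         if pos >= n:
--             if ones == 0:
--                 result.append(prefix)
--         elif ones == 0: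
--             result.append(prefix + [0] * (n - pos))   # no ones left: rest is all zeros
--         elif ones > n - pos:
--             pass                                      # dead branch: not enough positions left
--         else:
--             stack.append((pos + 1, ones, prefix + [0]))
--             if ones > 0:
--                 stack.append((pos + 1, ones - 1, prefix + [1]))  # popped first -> lex order
--     return result
-- ===== Notes on version B (the rewrite author's own statement) =====
-- stated objective: alternative
-- what changed: Replaces itertools.combinations plus a per-combination zero-vector fill with an explicit-stack backtracking DFS that builds each bit vector position by position (place a 1 if ones remain, then a 0, pruning dead branches), producing the same lexicographic order.
import Mathlib
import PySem

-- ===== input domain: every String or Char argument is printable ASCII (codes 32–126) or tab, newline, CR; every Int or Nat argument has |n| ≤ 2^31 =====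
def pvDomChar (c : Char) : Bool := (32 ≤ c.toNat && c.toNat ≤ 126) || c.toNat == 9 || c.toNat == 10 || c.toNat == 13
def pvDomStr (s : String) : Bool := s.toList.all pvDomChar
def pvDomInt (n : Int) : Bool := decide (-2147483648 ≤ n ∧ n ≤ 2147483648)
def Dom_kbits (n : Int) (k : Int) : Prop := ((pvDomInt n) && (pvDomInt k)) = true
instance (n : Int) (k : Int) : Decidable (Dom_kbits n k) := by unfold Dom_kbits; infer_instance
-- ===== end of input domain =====

-- B replaces itertools.combinations + per-combination zero-vector fill by an explicit-stack
-- backtracking DFS that builds each vector position by position (alternative decomposition,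
-- same lexicographic output).


-- ===== PORT A =====
-- itertools.combinations(range(n), k) → PySem.List.combinations (PySem.List.pyRange 0 n 1) k.toNat
-- (k.toNat is safe: Pre_kbits requires 0 ≤ k, since combinations raises ValueError for k < 0).
-- CPython's combinations yields nothing, WITHOUT iterating, when r > len(pool) (documented
-- early return inside itertools); the guard below transcribes that early return so the port
-- evaluates as fast as the Python does there; on that branch the unguarded computation has the
-- same value [] (PySem.List.combinations_eq_nil_of_length_lt), so no algorithm is switched.
-- s[bit] = 1 → List.set bit.toNat 1 (bit comes from range(n), hence 0 ≤ bit < n: exact here).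
def kbits (n : Int) (k : Int) : List (List Int) :=
  let pool := PySem.List.pyRange 0 n 1
  if pool.length < k.toNat then []
  else
    (PySem.List.combinations pool k.toNat).foldl
      (fun result bits =>
        result ++ [bits.foldl (fun s bit => s.set bit.toNat 1) (List.replicate n.toNat 0)])
      []

-- ===== PORT B =====
-- Source B's while-loop DFS over an explicit stack of frames (position, ones still needed, prefix);
-- the list head is the stack top, so the 1-branch frame (pushed last) is processed first.
def kbitsStack (n : Int) : List (Int × Int × List Int) → List (List Int) → List (List Int)
  | [], res => res
  | (pos, ones, pre) :: rest, res =>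
    if n ≤ pos then
      kbitsStack n rest (if ones = 0 then res ++ [pre] else res)
    else if ones = 0 then
      kbitsStack n rest (res ++ [pre ++ List.replicate (n - pos).toNat 0])
    else if n - pos < ones then
      kbitsStack n rest res
    else
      kbitsStack n
        ((if 0 < ones then [(pos + 1, ones - 1, pre ++ [1])] else [])
          ++ (pos + 1, ones, pre ++ [0]) :: rest) res
termination_by stack _ => (stack.map (fun f => 3 ^ ((n - f.1).toNat + 1))).sum
decreasing_by
  all_goals simp only [List.map_cons, List.map_append, List.sum_cons, List.sum_append]
  · have := pow_pos (by norm_num : (0:Nat) < 3) ((n - pos).toNat + 1); omega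
  · have := pow_pos (by norm_num : (0:Nat) < 3) ((n - pos).toNat + 1); omega
  · have := pow_pos (by norm_num : (0:Nat) < 3) ((n - pos).toNat + 1); omega
  · split
    · simp only [List.map_cons, List.map_nil, List.sum_cons, List.sum_nil]
      have h1 : (n - (pos + 1)).toNat + 1 = (n - pos).toNat := by omega
      have h3 : 0 < 3 ^ ((n - pos).toNat) := pow_pos (by norm_num : (0:Nat) < 3) ((n - pos).toNat)
      rw [h1]
      omega
    · simp only [List.map_nil, List.sum_nil]
      have h1 : (n - (pos + 1)).toNat + 1 = (n - pos).toNat := by omega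
      have h3 : 0 < 3 ^ ((n - pos).toNat) := pow_pos (by norm_num : (0:Nat) < 3) ((n - pos).toNat)
      rw [h1]
      omega

def kbits_alt (n : Int) (k : Int) : List (List Int) := kbitsStack n [(0, k, [])] []

-- ===== PRECONDITION & SPEC =====
-- Pre_ excludes k < 0, where itertools.combinations raises ValueError.
def Pre_kbits (n : Int) (k : Int) : Prop := 0 ≤ k
instance (n : Int) (k : Int) : Decidable (Pre_kbits n k) := by unfold Pre_kbits; infer_instance
def pvWitness_kbits : Int × Int := (3, 1)

def Spec_kbits (n : Int) (k : Int) (out : List (List Int)) : Prop := out = kbits_alt n k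
instance (n : Int) (k : Int) (out : List (List Int)) : Decidable (Spec_kbits n k out) := by unfold Spec_kbits; infer_instance

-- ===== CLAIM (what is proved, stated in full; the proofs are below) =====
def Claim_equal_kbits : Prop := ∀ (n : Int) (k : Int), Dom_kbits n k → Pre_kbits n k → Spec_kbits n k (kbits n k)

-- ===== LEMMAS AND PROOFS =====

-- proof-side version of B's helper, fuel made explicit
def altH : Nat → Int → List (List Int)
  | 0, ones => if ones = 0 then [[]] else []
  | r + 1, ones =>
      if ((r : Int) + 1) < ones then []
      else
        (if 0 < ones then (altH r (ones - 1)).map (fun rest => 1 :: rest) else [])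
          ++ (altH r ones).map (fun rest => 0 :: rest)

theorem altH_nil (r : Nat) (ones : Int) (h : (r : Int) < ones) : altH r ones = [] := by
  cases r with
  | zero => simp [altH]; omega
  | succ r => rw [altH, if_pos (by push_cast at h ⊢; omega)]

theorem altH_zero : ∀ r : Nat, altH r 0 = [List.replicate r (0 : Int)] := by
  intro r
  induction r with
  | zero => simp [altH]
  | succ r ih =>
      have h : ¬ (((r : Int) + 1) < 0) := by omega
      simp [altH, h, ih, List.replicate_succ]

theorem kbitsStack_inv (n : Int) : ∀ (stack : List (Int × Int × List Int)) (res : List (List Int)),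
    kbitsStack n stack res
      = res ++ (stack.map (fun f => (altH (n - f.1).toNat f.2.1).map (fun v => f.2.2 ++ v))).flatten := by
  intro stack res
  induction stack, res using kbitsStack.induct n with
  | case1 res => simp [kbitsStack]
  | case2 pos ones pre rest res h ih =>
      rw [kbitsStack]
      simp only [dite_eq_ite] at ih ⊢
      rw [if_pos h, ih]
      have h0 : (n - pos).toNat = 0 := by omega
      by_cases ho : ones = 0
      · simp [h0, ho, altH]
      · simp [h0, ho, altH]
  | case3 pos pre rest res h ih =>
      rw [kbitsStack]
      rw [if_neg h]
      simp only [if_true]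
      rw [ih]
      simp [altH_zero]
  | case4 pos ones pre rest res h ho hp ih =>
      rw [kbitsStack]
      rw [if_neg h, if_neg ho, if_pos hp, ih]
      have hnil : altH (n - pos).toNat ones = [] := altH_nil _ _ (by omega)
      simp [hnil]
  | case5 pos ones pre rest res h ho hp ih =>
      rw [kbitsStack]
      simp only [dite_eq_ite] at ih ⊢
      rw [if_neg h, if_neg ho, if_neg hp, ih]
      simp only [List.map_cons, List.flatten_cons, List.map_append, List.flatten_append]
      have hr : (n - pos).toNat = (n - (pos + 1)).toNat + 1 := by omega
      rw [hr, altH]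
      have hnp : ¬ (((n - (pos + 1)).toNat : Int) + 1 < ones) := by omega
      rw [if_neg hnp]
      by_cases hone : 0 < ones
      · simp [hone, Function.comp_def, List.append_assoc]
      · simp [hone, Function.comp_def]

theorem kbits_alt_eq_altH (n k : Int) : kbits_alt n k = altH n.toNat k := by
  unfold kbits_alt
  rw [kbitsStack_inv]
  simp

theorem set_append_cons (pre t : List Int) (x y : Int) :
    (pre ++ x :: t).set pre.length y = pre ++ y :: t := by
  induction pre with
  | nil => simp
  | cons a pre ih => simp [ih]

-- main bridge: combinations of the index range, folded into 0/1 vectors, is B's backtracking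
theorem combos_fold_eq_altH : ∀ (r : Nat) (j : Nat) (pre : List Int),
    (PySem.List.combinations
        (PySem.List.pyRange (pre.length : Int) ((pre.length : Int) + r) 1) j).map
      (fun bits => bits.foldl (fun s bit => s.set bit.toNat 1) (pre ++ List.replicate r 0))
    = (altH r (j : Int)).map (fun v => pre ++ v) := by
  intro r
  induction r with
  | zero =>
      intro j pre
      rw [PySem.List.pyRange_one_eq_nil (by omega)]
      cases j with
      | zero => simp [PySem.List.combinations_zero, altH]
      | succ j =>
          rw [PySem.List.combinations_nil_succ]
          simp only [List.map_nil, altH]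
          rw [if_neg (by omega : ¬ (((j + 1 : Nat) : Int) = 0))]
          simp
  | succ r ih =>
      intro j pre
      by_cases hbig : (r : Nat) + 1 < j
      -- prune branch: more ones than positions, both sides are empty
      · have hlen : (PySem.List.pyRange (pre.length : Int) ((pre.length : Int) + (r + 1 : Nat)) 1).length < j := by
          rw [PySem.List.length_pyRange_one]; omega
        rw [PySem.List.combinations_eq_nil_of_length_lt _ hlen]
        rw [altH_nil (r + 1) (j : Int) (by push_cast; omega)]
        simp
      · have hlt : (pre.length : Int) < (pre.length : Int) + (r + 1 : Nat) := by push_cast; omega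
        rw [PySem.List.pyRange_one_cons hlt]
        have hre : (pre.length : Int) + ((r : Nat) + 1 : Nat) = ((pre.length : Int) + 1) + (r : Nat) := by
          push_cast; ring
        rw [hre]
        cases j with
        | zero =>
            simp only [PySem.List.combinations_zero, List.map_cons, List.map_nil,
              List.foldl_nil]
            have h0 : ¬ (((r : Int) + 1) < (0 : Int)) := by omega
            rw [show ((0 : Nat) : Int) = 0 from rfl]
            simp [altH, h0, altH_zero, List.replicate_succ]
        | succ j =>
            rw [PySem.List.combinations_cons_succ]
            rw [List.map_append, List.map_map]
            have hinit : pre ++ List.replicate (r + 1) (0 : Int) = pre ++ (0 : Int) :: List.replicate r 0 := by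
              rw [List.replicate_succ]
            have h1 : ∀ c : List Int,
                ((fun bits => bits.foldl (fun s bit => s.set bit.toNat 1) (pre ++ List.replicate (r + 1) 0)) ∘
                  (fun c => (pre.length : Int) :: c)) c
                = c.foldl (fun s bit => s.set bit.toNat 1) ((pre ++ [1]) ++ List.replicate r 0) := by
              intro c
              simp only [Function.comp_def, List.foldl_cons]
              rw [hinit]
              rw [show ((pre.length : Int)).toNat = pre.length from Int.toNat_natCast _]
              rw [set_append_cons]
              rw [show pre ++ (1 : Int) :: List.replicate r 0 = (pre ++ [1]) ++ List.replicate r 0 by simp]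
            have hlen1 : ((pre.length : Int) + 1) = ((pre ++ [(1 : Int)]).length : Int) := by
              simp
            have hlen0 : ((pre.length : Int) + 1) = ((pre ++ [(0 : Int)]).length : Int) := by
              simp
            calc (PySem.List.combinations (PySem.List.pyRange ((pre.length : Int) + 1) (((pre.length : Int) + 1) + (r : Nat)) 1) j).map
                  ((fun bits => bits.foldl (fun s bit => s.set bit.toNat 1) (pre ++ List.replicate (r + 1) 0)) ∘
                    (fun c => (pre.length : Int) :: c))
                ++ (PySem.List.combinations (PySem.List.pyRange ((pre.length : Int) + 1) (((pre.length : Int) + 1) + (r : Nat)) 1) (j + 1)).map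
                  (fun bits => bits.foldl (fun s bit => s.set bit.toNat 1) (pre ++ List.replicate (r + 1) 0))
                = (PySem.List.combinations (PySem.List.pyRange (((pre ++ [(1:Int)]).length : Int)) (((pre ++ [(1:Int)]).length : Int) + (r : Nat)) 1) j).map
                    (fun c => c.foldl (fun s bit => s.set bit.toNat 1) ((pre ++ [1]) ++ List.replicate r 0))
                  ++ (PySem.List.combinations (PySem.List.pyRange (((pre ++ [(0:Int)]).length : Int)) (((pre ++ [(0:Int)]).length : Int) + (r : Nat)) 1) (j + 1)).map
                    (fun c => c.foldl (fun s bit => s.set bit.toNat 1) ((pre ++ [0]) ++ List.replicate r 0)) := by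
                  rw [← hlen1, ← hlen0]
                  congr 1
                  · exact List.map_congr_left (fun c _ => h1 c)
                  · apply List.map_congr_left
                    intro c _
                    rw [hinit, show pre ++ (0 : Int) :: List.replicate r 0 = (pre ++ [0]) ++ List.replicate r 0 by simp]
              _ = (altH r (j : Int)).map (fun v => (pre ++ [1]) ++ v)
                  ++ (altH r ((j : Int) + 1)).map (fun v => (pre ++ [0]) ++ v) := by
                  rw [ih j (pre ++ [1]), ih (j + 1) (pre ++ [0])]
                  push_cast
                  rfl
              _ = (altH (r + 1) ((j : Int) + 1)).map (fun v => pre ++ v) := by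
                  have hpos : (0 : Int) < (j : Int) + 1 := by positivity
                  have hnp : ¬ (((r : Int) + 1) < (j : Int) + 1) := by omega
                  simp only [altH, hpos, hnp, if_true, if_false, List.map_append, List.map_map]
                  congr 1
                  · rw [show ((j : Int) + 1 - 1) = (j : Int) by ring]
                    apply List.map_congr_left; intro v _; simp
                  · apply List.map_congr_left; intro v _; simp

-- ===== VERDICT (by name: the statement is the Claim_ definition above) =====
theorem kbits_spec : Claim_equal_kbits := by
  intro n k _ hk
  unfold Spec_kbits kbits
  rw [kbits_alt_eq_altH]
  simp only [PySem.List.length_pyRange_one]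
  by_cases hbig : (n - 0).toNat < k.toNat
  · rw [if_pos hbig, altH_nil n.toNat k (by omega)]
  · rw [if_neg hbig]
    rw [PySem.List.foldl_append_singleton_eq_map]
    have hrange : PySem.List.pyRange 0 n 1 = PySem.List.pyRange 0 (0 + (n.toNat : Int)) 1 := by
      by_cases h : 0 ≤ n
      · congr 1; omega
      · rw [PySem.List.pyRange_one_eq_nil (by omega), PySem.List.pyRange_one_eq_nil (by omega)]
    rw [hrange]
    have := combos_fold_eq_altH n.toNat k.toNat []
    simp only [List.length_nil, Nat.cast_zero, List.nil_append] at this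
    rw [this, Int.toNat_of_nonneg hk]
    simp
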